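-- pv_equiv track=rewrite | github.com/nancyB3a/2022_01_PGY1121 | VuelosDuoc/funciones.py | validaVacio
-- ===== SOURCE A (Python) =====
-- def validaVacio(asiento,asientos):
--     contador=1
--     disponible=False
--     for f in range(7):
--         for c in range(6):
--             if asiento==contador:
--                 if len(asientos[f,c])==0:
--                     disponible=True
--                     break #rompe el for de las columnas
--                 else:
--                     break #rompe el for de las columnas
--             contador+=1
--         if disponible:
--             break #rompe el for de las filas cuando ha encontrado vacía la posición buscada
--     if disponible: #si llega hasta esta línea es por que finalizaron ambos for, de todos modos verifico el flag
--         return(f,c)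
--     else:#no encuentra el asiento vacío, entonces retorno valores inexistentes
--         return(-1,-1)
-- ===== SOURCE B (Python) =====
-- def validaVacio(asiento, asientos):
--     if 1 <= asiento <= 42:
--         f, c = divmod(asiento - 1, 6)
--         if len(asientos[f, c]) == 0:
--             return (f, c)
--         return (-1, -1)
--     return (-1, -1)
-- ===== Notes on version B (the rewrite author's own statement) =====
-- stated objective: simpler
-- what changed: B computes the seat's row and column directly with divmod(asiento-1, 6) and does one dict lookup, replacing A's nested 7x6 scan with a counter and break flags; Pre_ excludes the inputs where A raises KeyError and the occupied-seat corner where A's leftover-counter scan runs on into later rows' column-0 cells and returns one of them, because B's value (-1, -1) is the intended one there.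
-- outside the precondition, e.g. on validaVacio(1, {(0, 0): 'X', (1, 0): ''}): A returns (1, 0), B returns (-1, -1); on validaVacio(3, {(0, 2): 'X', (1, 0): ''}): A returns (1, 0), B returns (-1, -1)
import Mathlib
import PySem

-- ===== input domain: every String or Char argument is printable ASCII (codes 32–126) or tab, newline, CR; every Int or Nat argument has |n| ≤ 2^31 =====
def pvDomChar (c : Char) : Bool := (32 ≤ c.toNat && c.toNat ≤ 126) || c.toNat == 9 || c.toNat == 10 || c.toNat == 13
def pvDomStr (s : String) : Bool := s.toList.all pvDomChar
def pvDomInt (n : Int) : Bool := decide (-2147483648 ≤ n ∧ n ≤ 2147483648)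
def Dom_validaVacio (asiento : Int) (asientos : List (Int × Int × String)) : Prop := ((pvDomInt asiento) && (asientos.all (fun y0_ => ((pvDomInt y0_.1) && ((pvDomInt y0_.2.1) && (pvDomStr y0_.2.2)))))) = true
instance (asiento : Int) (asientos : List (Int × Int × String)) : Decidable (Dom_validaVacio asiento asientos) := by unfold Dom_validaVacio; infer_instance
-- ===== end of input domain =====

-- B replaces A's nested 7x6 counter scan by a direct divmod coordinate computation (simpler); return values agree on Pre_, which excludes A's KeyError inputs and the occupied-seat corner where A's leftover-counter scan returns a later row's cell.


-- dict lookup asientos[f, c]: first entry whose key pair is (f, c); none = KeyError (exact Python dict-lookup semantics for this flattened-triple encoding)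
def getFC (d : List (Int × Int × String)) (f c : Int) : Option String :=
  match d with
  | [] => none
  | (a, b, s) :: rest => if a = f ∧ b = c then some s else getFC rest f c

-- ===== PORT A =====
-- inner 'for c in range(6)' loop: returns (contador after the loop, none = no break | some (disponible, c) = break at column c)
def vvInner (asiento : Int) (d : List (Int × Int × String)) (f : Int) (cs : List Int) (contador : Int) : Int × Option (Bool × Int) :=
  match cs with
  | [] => (contador, none)
  | c :: rest =>
    if asiento = contador then
      match getFC d f c with
      | some s => if PySem.Str.len s = 0 then (contador, some (true, c)) else (contador, some (false, c))
      | none => (contador, some (false, c)) -- Python raises KeyError here; such inputs are outside Pre_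
    else vvInner asiento d f rest (contador + 1)

-- outer 'for f in range(7)' loop with the disponible flag and final return
def vvOuter (asiento : Int) (d : List (Int × Int × String)) (fs : List Int) (contador : Int) : Int × Int :=
  match fs with
  | [] => (-1, -1)
  | f :: rest =>
    match vvInner asiento d f (PySem.List.pyRange 0 6 1) contador with
    | (_, some (true, c)) => (f, c)
    | (c', some (false, _)) => vvOuter asiento d rest c'
    | (c', none) => vvOuter asiento d rest c'

def validaVacio (asiento : Int) (asientos : List (Int × Int × String)) : Int × Int :=
  vvOuter asiento asientos (PySem.List.pyRange 0 7 1) 1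

-- ===== PORT B =====
def validaVacio_alt (asiento : Int) (asientos : List (Int × Int × String)) : Int × Int :=
  if 1 ≤ asiento ∧ asiento ≤ 42 then
    let f := PySem.Int.floordiv (asiento - 1) 6
    let c := PySem.Int.mod (asiento - 1) 6
    match getFC asientos f c with
    | some s => if PySem.Str.len s = 0 then (f, c) else (-1, -1)
    | none => (-1, -1) -- Python raises KeyError here; such inputs are outside Pre_
  else (-1, -1)

-- ===== PRECONDITION & SPEC =====
-- Pre_ excludes (a) the inputs where A raises KeyError (the sought seat's key, or — once the seat is
-- occupied — a later row's column-0 key touched by A's continued scan, is missing), and (b) the corner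
-- where the sought seat is occupied and a later row's column-0 cell is present but empty, on which A's
-- leftover counter keeps matching and returns that unrelated cell while B returns (-1, -1) for an
-- occupied seat (see cites in claim.json).
def Pre_validaVacio (asiento : Int) (asientos : List (Int × Int × String)) : Prop :=
  (1 ≤ asiento ∧ asiento ≤ 42) →
    ((getFC asientos (PySem.Int.floordiv (asiento - 1) 6) (PySem.Int.mod (asiento - 1) 6)).isSome = true
     ∧ ((getFC asientos (PySem.Int.floordiv (asiento - 1) 6) (PySem.Int.mod (asiento - 1) 6)).getD "" ≠ "" →
         ∀ f ∈ PySem.List.pyRange (PySem.Int.floordiv (asiento - 1) 6 + 1) 7 1,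
           (getFC asientos f 0).getD "" ≠ ""))
instance (asiento : Int) (asientos : List (Int × Int × String)) : Decidable (Pre_validaVacio asiento asientos) := by unfold Pre_validaVacio; infer_instance
def pvWitness_validaVacio : Int × (List (Int × Int × String)) := (1, [(0, 0, "")])

def Spec_validaVacio (asiento : Int) (asientos : List (Int × Int × String)) (out : Int × Int) : Prop := out = validaVacio_alt asiento asientos
instance (asiento : Int) (asientos : List (Int × Int × String)) (out : Int × Int) : Decidable (Spec_validaVacio asiento asientos out) := by unfold Spec_validaVacio; infer_instance



-- ===== CLAIM (what is proved, stated in full; the proofs are below) =====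
def Claim_equal_validaVacio : Prop := ∀ (asiento : Int) (asientos : List (Int × Int × String)), Dom_validaVacio asiento asientos → Pre_validaVacio asiento asientos → Spec_validaVacio asiento asientos (validaVacio asiento asientos)

-- ===== LEMMAS AND PROOFS =====

theorem lenZero (s : String) : (PySem.Str.len s = 0) ↔ s = "" := by
  simp [PySem.Str.len_eq]

-- the scan A performs after breaking on an occupied seat: first later row with an empty column-0 cell
def chainFind (d : List (Int × Int × String)) (fs : List Int) : Int × Int :=
  match fs with
  | [] => (-1, -1)
  | f :: rest =>
    match getFC d f 0 with
    | some s => if PySem.Str.len s = 0 then (f, 0) else chainFind d rest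
    | none => chainFind d rest

theorem vvInner_skip (a : Int) (d : List (Int × Int × String)) (f : Int) :
    ∀ (cs : List Int) (contador : Int), (∀ k : Nat, k < cs.length → a ≠ contador + k) →
    vvInner a d f cs contador = (contador + cs.length, none) := by
  intro cs
  induction cs with
  | nil => intro contador h; simp [vvInner]
  | cons c rest ih =>
    intro contador h
    have h0 : a ≠ contador := by have := h 0 (by simp); simpa using this
    have h' : ∀ k : Nat, k < rest.length → a ≠ (contador + 1) + k := by
      intro k hk
      have := h (k + 1) (by simpa using Nat.succ_lt_succ hk)
      push_cast at this ⊢; omega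
    simp only [vvInner, if_neg h0]
    rw [ih (contador + 1) h']
    simp [Prod.ext_iff]; push_cast; ring

theorem vvInner_hit (a : Int) (d : List (Int × Int × String)) (f : Int) :
    ∀ (cs : List Int) (k : Nat) (contador : Int) (hk : k < cs.length), a = contador + k →
    vvInner a d f cs contador =
      (contador + k,
        some ((match getFC d f (cs.get ⟨k, hk⟩) with
               | some s => decide (PySem.Str.len s = 0)
               | none => false), cs.get ⟨k, hk⟩)) := by
  intro cs
  induction cs with
  | nil => intro k contador hk; simp at hk
  | cons c rest ih =>
    intro k contador hk ha
    cases k with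
    | zero =>
      simp only [Nat.cast_zero, add_zero] at ha
      simp only [vvInner, if_pos ha.symm]
      rcases hg : getFC d f c with _ | s
      · simp [hg, ha]
      · by_cases hs : s = "" <;> simp [hg, hs, ha]
    | succ k =>
      have h0 : a ≠ contador := by push_cast at ha; omega
      have ha' : a = (contador + 1) + k := by push_cast at ha ⊢; omega
      simp only [vvInner, if_neg h0]
      rw [ih k (contador + 1) (by simpa using Nat.succ_lt_succ_iff.mp hk) ha']
      simp [Prod.ext_iff]; push_cast; omega

theorem vvOuter_skip (a : Int) (d : List (Int × Int × String)) (f : Int) (rest : List Int)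
    (contador : Int) (h : a < contador ∨ contador + 5 < a) :
    vvOuter a d (f :: rest) contador = vvOuter a d rest (contador + 6) := by
  have h6 : PySem.List.pyRange 0 6 1 = [0, 1, 2, 3, 4, 5] := by decide
  have hs := vvInner_skip a d f [0, 1, 2, 3, 4, 5] contador
    (by intro k hk; simp at hk; interval_cases k <;> push_cast <;> omega)
  simp only [vvOuter, h6, hs]
  norm_num

theorem vvOuter_chain (a : Int) (d : List (Int × Int × String)) :
    ∀ (fs : List Int) (contador : Int), a = contador →
    vvOuter a d fs contador = chainFind d fs := by
  intro fs
  induction fs with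
  | nil => intro contador _; simp [vvOuter, chainFind]
  | cons f rest ih =>
    intro contador ha
    subst ha
    have h6 : PySem.List.pyRange 0 6 1 = (0 : Int) :: [1, 2, 3, 4, 5] := by decide
    simp only [vvOuter, h6, vvInner, if_pos rfl]
    rcases hg : getFC d f 0 with _ | s
    · simp [hg, chainFind, ih a rfl]
    · by_cases hs : s = "" <;> simp [hg, hs, chainFind, ih a rfl]

theorem vvOuter_hit (a : Int) (d : List (Int × Int × String)) (f : Int) (rest : List Int)
    (contador k : Int) (h0 : 0 ≤ k) (h6 : k < 6) (ha : a = contador + k) :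
    vvOuter a d (f :: rest) contador =
      (match getFC d f k with
       | some s => if PySem.Str.len s = 0 then (f, k) else chainFind d rest
       | none => chainFind d rest) := by
  obtain ⟨n, rfl⟩ : ∃ n : Nat, k = (n : Int) := ⟨k.toNat, (Int.toNat_of_nonneg h0).symm⟩
  have hn : n < 6 := by exact_mod_cast h6
  have hln : n < ([0, 1, 2, 3, 4, 5] : List Int).length := by simpa using hn
  have hget : ([0, 1, 2, 3, 4, 5] : List Int).get ⟨n, hln⟩ = (n : Int) := by
    interval_cases n <;> rfl
  have h6l : PySem.List.pyRange 0 6 1 = [0, 1, 2, 3, 4, 5] := by decide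
  simp only [vvOuter, h6l]
  rw [vvInner_hit a d f [0, 1, 2, 3, 4, 5] n contador hln ha, hget]
  rcases hg : getFC d f (n : Int) with _ | s
  · simp only [hg]
    exact vvOuter_chain a d rest (contador + n) ha
  · by_cases hs : s = "" <;>
      simp [hs, vvOuter_chain a d rest (contador + (n : Int)) ha]

theorem A_out (a : Int) (d : List (Int × Int × String)) (h : a < 1 ∨ 42 < a) :
    validaVacio a d = (-1, -1) := by
  have h7 : PySem.List.pyRange 0 7 1 = [0, 1, 2, 3, 4, 5, 6] := by decide
  unfold validaVacio
  rw [h7,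
    vvOuter_skip a d 0 [1, 2, 3, 4, 5, 6] 1 (by omega),
    vvOuter_skip a d 1 [2, 3, 4, 5, 6] (1 + 6) (by omega),
    vvOuter_skip a d 2 [3, 4, 5, 6] (1 + 6 + 6) (by omega),
    vvOuter_skip a d 3 [4, 5, 6] (1 + 6 + 6 + 6) (by omega),
    vvOuter_skip a d 4 [5, 6] (1 + 6 + 6 + 6 + 6) (by omega),
    vvOuter_skip a d 5 [6] (1 + 6 + 6 + 6 + 6 + 6) (by omega),
    vvOuter_skip a d 6 [] (1 + 6 + 6 + 6 + 6 + 6 + 6) (by omega)]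
  simp [vvOuter]

theorem A_char (a : Int) (d : List (Int × Int × String)) (q r : Int)
    (hq0 : 0 ≤ q) (hq6 : q ≤ 6) (hr0 : 0 ≤ r) (hr6 : r < 6) (ha : a = 1 + 6 * q + r) :
    validaVacio a d =
      (match getFC d q r with
       | some s => if PySem.Str.len s = 0 then (q, r) else chainFind d (PySem.List.pyRange (q + 1) 7 1)
       | none => chainFind d (PySem.List.pyRange (q + 1) 7 1)) := by
  have h7 : PySem.List.pyRange 0 7 1 = [0, 1, 2, 3, 4, 5, 6] := by decide
  unfold validaVacio
  rw [h7]
  interval_cases q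
  · rw [vvOuter_hit a d 0 [1, 2, 3, 4, 5, 6] 1 r hr0 hr6 (by omega),
      show PySem.List.pyRange ((0 : Int) + 1) 7 1 = [1, 2, 3, 4, 5, 6] from by decide]
  · rw [vvOuter_skip a d 0 [1, 2, 3, 4, 5, 6] 1 (by omega),
      vvOuter_hit a d 1 [2, 3, 4, 5, 6] (1 + 6) r hr0 hr6 (by omega),
      show PySem.List.pyRange ((1 : Int) + 1) 7 1 = [2, 3, 4, 5, 6] from by decide]
  · rw [vvOuter_skip a d 0 [1, 2, 3, 4, 5, 6] 1 (by omega),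
      vvOuter_skip a d 1 [2, 3, 4, 5, 6] (1 + 6) (by omega),
      vvOuter_hit a d 2 [3, 4, 5, 6] (1 + 6 + 6) r hr0 hr6 (by omega),
      show PySem.List.pyRange ((2 : Int) + 1) 7 1 = [3, 4, 5, 6] from by decide]
  · rw [vvOuter_skip a d 0 [1, 2, 3, 4, 5, 6] 1 (by omega),
      vvOuter_skip a d 1 [2, 3, 4, 5, 6] (1 + 6) (by omega),
      vvOuter_skip a d 2 [3, 4, 5, 6] (1 + 6 + 6) (by omega),
      vvOuter_hit a d 3 [4, 5, 6] (1 + 6 + 6 + 6) r hr0 hr6 (by omega),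
      show PySem.List.pyRange ((3 : Int) + 1) 7 1 = [4, 5, 6] from by decide]
  · rw [vvOuter_skip a d 0 [1, 2, 3, 4, 5, 6] 1 (by omega),
      vvOuter_skip a d 1 [2, 3, 4, 5, 6] (1 + 6) (by omega),
      vvOuter_skip a d 2 [3, 4, 5, 6] (1 + 6 + 6) (by omega),
      vvOuter_skip a d 3 [4, 5, 6] (1 + 6 + 6 + 6) (by omega),
      vvOuter_hit a d 4 [5, 6] (1 + 6 + 6 + 6 + 6) r hr0 hr6 (by omega),
      show PySem.List.pyRange ((4 : Int) + 1) 7 1 = [5, 6] from by decide]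
  · rw [vvOuter_skip a d 0 [1, 2, 3, 4, 5, 6] 1 (by omega),
      vvOuter_skip a d 1 [2, 3, 4, 5, 6] (1 + 6) (by omega),
      vvOuter_skip a d 2 [3, 4, 5, 6] (1 + 6 + 6) (by omega),
      vvOuter_skip a d 3 [4, 5, 6] (1 + 6 + 6 + 6) (by omega),
      vvOuter_skip a d 4 [5, 6] (1 + 6 + 6 + 6 + 6) (by omega),
      vvOuter_hit a d 5 [6] (1 + 6 + 6 + 6 + 6 + 6) r hr0 hr6 (by omega),
      show PySem.List.pyRange ((5 : Int) + 1) 7 1 = [6] from by decide]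
  · rw [vvOuter_skip a d 0 [1, 2, 3, 4, 5, 6] 1 (by omega),
      vvOuter_skip a d 1 [2, 3, 4, 5, 6] (1 + 6) (by omega),
      vvOuter_skip a d 2 [3, 4, 5, 6] (1 + 6 + 6) (by omega),
      vvOuter_skip a d 3 [4, 5, 6] (1 + 6 + 6 + 6) (by omega),
      vvOuter_skip a d 4 [5, 6] (1 + 6 + 6 + 6 + 6) (by omega),
      vvOuter_skip a d 5 [6] (1 + 6 + 6 + 6 + 6 + 6) (by omega),
      vvOuter_hit a d 6 [] (1 + 6 + 6 + 6 + 6 + 6 + 6) r hr0 hr6 (by omega),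
      show PySem.List.pyRange ((6 : Int) + 1) 7 1 = [] from by decide]

theorem chain_none (d : List (Int × Int × String)) :
    ∀ fs : List Int, (∀ f ∈ fs, getFC d f 0 ≠ none ∧ getFC d f 0 ≠ some "") →
    chainFind d fs = (-1, -1) := by
  intro fs
  induction fs with
  | nil => intro _; simp [chainFind]
  | cons f rest ih =>
    intro h
    obtain ⟨hn, hne⟩ := h f (by simp)
    rcases hg : getFC d f 0 with _ | s
    · exact absurd hg hn
    · have hs : s ≠ "" := by intro e; rw [e] at hg; exact hne hg
      simp [chainFind, hg, lenZero, hs, ih (fun f' hf => h f' (by simp [hf]))]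

theorem qr_decomp (a : Int) (h1 : 1 ≤ a) (h2 : a ≤ 42) :
    ∃ q r : Int, q = PySem.Int.floordiv (a - 1) 6 ∧ r = PySem.Int.mod (a - 1) 6 ∧
      0 ≤ q ∧ q ≤ 6 ∧ 0 ≤ r ∧ r < 6 ∧ a = 1 + 6 * q + r := by
  refine ⟨_, _, rfl, rfl, ?_, ?_, ?_, ?_, ?_⟩ <;>
  · have hdm := PySem.Int.floordiv_mul_add_mod (a - 1) 6
    have hm0 := PySem.Int.mod_nonneg (a - 1) (b := 6) (by norm_num)
    have hml := PySem.Int.mod_lt (a - 1) (b := 6) (by norm_num)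
    omega

-- ===== VERDICT (by name: the statement is the Claim_ definition above) =====
theorem validaVacio_spec : Claim_equal_validaVacio := by
  intro a d hdom hpre
  simp only [Pre_validaVacio] at hpre
  show validaVacio a d = validaVacio_alt a d
  by_cases h : 1 ≤ a ∧ a ≤ 42
  · obtain ⟨q, r, hq, hr, hq0, hq6, hr0, hr6, ha⟩ := qr_decomp a h.1 h.2
    rw [← hq, ← hr] at hpre
    rw [A_char a d q r hq0 hq6 hr0 hr6 ha]
    simp only [validaVacio_alt, if_pos h, ← hq, ← hr]
    obtain ⟨hsome, hchain⟩ := hpre h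
    rcases hg : getFC d q r with _ | s
    · rw [hg] at hsome; simp at hsome
    · by_cases hs : s = ""
      · subst hs; simp [hg, lenZero]
      · have hlen : ¬ PySem.Str.len s = 0 := by simp [lenZero, hs]
        simp only [hg, if_neg hlen]
        have hpres := hchain (by rw [hg]; simpa using hs)
        refine chain_none d _ (fun f hf => ?_)
        have hne := hpres f hf
        rcases hg' : getFC d f 0 with _ | s'
        · rw [hg'] at hne; simp at hne
        · have hs' : s' ≠ "" := by rw [hg'] at hne; simpa using hne
          exact ⟨by simp, by simp [hs']⟩
  · rw [A_out a d (by omega)]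
    simp only [validaVacio_alt, if_neg h]
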